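-- pv_equiv track=rewrite | github.com/clawdeeo/agentskill | agentskill/synthesis/__init__.py | _generate_commands_section
-- ===== SOURCE A (Python) =====
-- from typing import Dict, List, Any
--
-- def _generate_commands_section(analyses: List[Dict]) -> str:
--     """Generate Commands and Workflows section."""
--     lines = [
--         "## Commands and Workflows",
--         "",
--     ]
--
--     all_commands = {}
--     for analysis in analyses:
--         commands = analysis.get("commands", {})
--         for category, cmds in commands.items():
--             if category not in all_commands:
--                 all_commands[category] = []
--             for cmd in cmds:
--                 if cmd not in all_commands[category]:
--                     all_commands[category].append(cmd)
--
--     if not all_commands: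
--         lines.append("No explicit commands detected. Check README.md for manual instructions.")
--         return "\n".join(lines)
--
--     category_order = ["install", "dev", "build", "test", "lint", "format", "deploy", "ci"]
--
--     for category in category_order:
--         if category not in all_commands or not all_commands[category]:
--             continue
--
--         lines.append(f"### {category.title()}")
--         for cmd in all_commands[category][:5]:
--             cmd_str = cmd.get("command", "")
--             source = cmd.get("source", "")
--             if len(cmd_str) < 80:
--                 lines.append(f"```bash")
--                 lines.append(f"{cmd_str}")
--                 lines.append(f"```")
--         lines.append("")
--
--     return "\n".join(lines)
-- ===== SOURCE B (Python) =====
-- from typing import Dict, List, Any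
--
-- _CATEGORY_ORDER = ["install", "dev", "build", "test", "lint", "format", "deploy", "ci"]
--
-- def _generate_commands_section(analyses: List[Dict]) -> str:
--     """Generate Commands and Workflows section (per-category scan, no global index)."""
--     out = ["## Commands and Workflows", ""]
--     if not any(a.get("commands", {}) for a in analyses):
--         out.append("No explicit commands detected. Check README.md for manual instructions.")
--         return "\n".join(out)
--     for category in _CATEGORY_ORDER:
--         cmds = []
--         for a in analyses:
--             for cat, cs in a.get("commands", {}).items():
--                 if cat == category:
--                     for c in cs:
--                         if c not in cmds:  # dicts: list membership, not a set
--                             cmds.append(c)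
--         if not cmds:
--             continue
--         out.append(f"### {category.title()}")
--         for cmd in cmds[:5]:
--             if len(cmd.get("command", "")) < 80:
--                 out += ["```bash", cmd.get("command", ""), "```"]
--         out.append("")
--     return "\n".join(out)
-- ===== Notes on version B (the rewrite author's own statement) =====
-- stated objective: alternative
-- what changed: B drops A's global category->commands index: it decides emptiness with one any() pass and then, for each of the 8 fixed categories, scans the analyses directly, deduping into a per-category list before rendering.
import Mathlib
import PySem

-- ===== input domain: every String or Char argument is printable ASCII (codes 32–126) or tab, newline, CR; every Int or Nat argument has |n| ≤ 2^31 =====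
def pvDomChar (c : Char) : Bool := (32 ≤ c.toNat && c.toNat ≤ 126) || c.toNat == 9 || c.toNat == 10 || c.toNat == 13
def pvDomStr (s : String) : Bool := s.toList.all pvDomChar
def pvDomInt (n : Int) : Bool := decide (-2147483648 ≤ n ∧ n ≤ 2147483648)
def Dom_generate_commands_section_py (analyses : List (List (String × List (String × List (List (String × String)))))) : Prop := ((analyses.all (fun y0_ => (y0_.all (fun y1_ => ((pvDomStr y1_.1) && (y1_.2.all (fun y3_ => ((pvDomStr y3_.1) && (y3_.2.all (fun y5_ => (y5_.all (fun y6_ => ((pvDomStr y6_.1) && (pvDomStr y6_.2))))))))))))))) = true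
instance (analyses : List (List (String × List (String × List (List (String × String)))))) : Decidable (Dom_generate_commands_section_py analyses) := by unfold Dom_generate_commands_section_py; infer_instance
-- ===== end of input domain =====

-- B replaces A's single-pass global dict index with an emptiness pre-check plus a direct
-- per-category scan of the analyses (alternative decomposition, similar cost).

-- ===== PORT A =====
-- shared input-dict helpers: the input "dicts" are assoc lists (convention: lookup = first match)
def agetD {α : Type} (l : List (String × α)) (k : String) (dflt : α) : α :=
  match l.find? (fun p => p.1 == k) with
  | some p => p.2
  | none => dflt

def aget? (l : List (String × String)) (k : String) : Option String :=
  (l.find? (fun p => p.1 == k)).map (·.2)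

-- Python 'cmd == other' on two dicts: same keys, same values (exact for assoc lists with
-- unique keys, i.e. every list arising from a Python dict; order-insensitive)
def pyDictEqSS (a b : List (String × String)) : Bool :=
  a.all (fun p => aget? b p.1 == aget? a p.1) && b.all (fun p => aget? a p.1 == aget? b p.1)

-- str.title(), exact on ASCII
def pyTitleChars : List Char → Bool → List Char
  | [], _ => []
  | c :: rest, prevAlpha =>
    if c.isAlpha then (if prevAlpha then c.toLower else c.toUpper) :: pyTitleChars rest true
    else c :: pyTitleChars rest false

def pyTitle (s : String) : String := String.ofList (pyTitleChars s.toList false)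

def generate_commands_section_py (analyses : List (List (String × List (String × List (List (String × String)))))) : String :=
  let lines : List String := ["## Commands and Workflows", ""]
  let all_commands : PySem.Dict String (List (List (String × String))) :=
    analyses.foldl (fun d analysis =>
      (agetD analysis "commands" []).foldl (fun d pr =>
        let d := if d.contains pr.1 then d else d.insert pr.1 []
        pr.2.foldl (fun d cmd =>
          if (d.getD pr.1 []).any (fun x => pyDictEqSS x cmd) then d
          else d.insert pr.1 (d.getD pr.1 [] ++ [cmd])) d) d)
      PySem.Dict.empty
  if all_commands.size == 0 then
    PySem.Str.join "\n" (lines ++ ["No explicit commands detected. Check README.md for manual instructions."])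
  else
    let category_order : List String := ["install", "dev", "build", "test", "lint", "format", "deploy", "ci"]
    let lines := category_order.foldl (fun lines category =>
      if !(all_commands.contains category) || all_commands.getD category [] == [] then lines
      else
        let lines := lines ++ ["### " ++ pyTitle category]
        let lines := (PySem.List.slice (all_commands.getD category []) none (some 5)).foldl (fun lines cmd =>
          let cmd_str := agetD cmd "command" ""
          if PySem.Str.len cmd_str < 80 then lines ++ ["```bash", cmd_str, "```"] else lines) lines
        lines ++ [""]) lines
    PySem.Str.join "\n" lines

-- ===== PORT B =====
def cmdsForCat (analyses : List (List (String × List (String × List (List (String × String)))))) (category : String) : List (List (String × String)) :=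
  analyses.foldl (fun acc a =>
    (agetD a "commands" []).foldl (fun acc pr =>
      if pr.1 == category then
        pr.2.foldl (fun acc c =>
          if acc.any (fun x => pyDictEqSS x c) then acc else acc ++ [c]) acc
      else acc) acc) []

def generate_commands_section_py_alt (analyses : List (List (String × List (String × List (List (String × String)))))) : String :=
  let out : List String := ["## Commands and Workflows", ""]
  if !(analyses.any (fun a => agetD a "commands" [] != [])) then
    PySem.Str.join "\n" (out ++ ["No explicit commands detected. Check README.md for manual instructions."])
  else
    let out := (["install", "dev", "build", "test", "lint", "format", "deploy", "ci"] : List String).foldl (fun out category =>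
      let cmds := cmdsForCat analyses category
      if cmds == [] then out
      else
        let out := out ++ ["### " ++ pyTitle category]
        let out := (PySem.List.slice cmds none (some 5)).foldl (fun out cmd =>
          if PySem.Str.len (agetD cmd "command" "") < 80 then out ++ ["```bash", agetD cmd "command" "", "```"] else out) out
        out ++ [""]) out
    PySem.Str.join "\n" out

-- ===== PRECONDITION & SPEC =====
def Spec_generate_commands_section_py (analyses : List (List (String × List (String × List (List (String × String)))))) (out : String) : Prop := out = generate_commands_section_py_alt analyses
instance (analyses : List (List (String × List (String × List (List (String × String)))))) (out : String) : Decidable (Spec_generate_commands_section_py analyses out) := by unfold Spec_generate_commands_section_py; infer_instance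

-- ===== CLAIM (what is proved, stated in full; the proofs are below) =====
def Claim_equal_generate_commands_section_py : Prop := ∀ (analyses : List (List (String × List (String × List (List (String × String)))))), Dom_generate_commands_section_py analyses → Spec_generate_commands_section_py analyses (generate_commands_section_py analyses)


-- ===== LEMMAS AND PROOFS =====

-- the dedup accumulator step shared (as a lambda) by both ports
def dstep (acc : List (List (String × String))) (cmd : List (String × String)) : List (List (String × String)) :=
  if acc.any (fun x => pyDictEqSS x cmd) then acc else acc ++ [cmd]

theorem dstep_def : dstep = fun acc cmd => if acc.any (fun x => pyDictEqSS x cmd) then acc else acc ++ [cmd] := rfl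

-- A's global dict build, named for the proofs (syntactically the port's expression)
def build (analyses : List (List (String × List (String × List (List (String × String)))))) : PySem.Dict String (List (List (String × String))) :=
  analyses.foldl (fun d analysis =>
    (agetD analysis "commands" []).foldl (fun d pr =>
      let d := if d.contains pr.1 then d else d.insert pr.1 []
      pr.2.foldl (fun d cmd =>
        if (d.getD pr.1 []).any (fun x => pyDictEqSS x cmd) then d
        else d.insert pr.1 (d.getD pr.1 [] ++ [cmd])) d) d)
    PySem.Dict.empty

-- the per-category command stream, in A's (= B's) traversal order
def streamOf (analyses : List (List (String × List (String × List (List (String × String)))))) (c : String) : List (List (String × String)) :=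
  analyses.flatMap (fun a => ((agetD a "commands" []).filter (fun pr => pr.1 == c)).flatMap (fun pr => pr.2))

-- --- inner command loop of A, at a fixed key ---
theorem inner_getD (key c : String) (cmds : List (List (String × String)))
    (d : PySem.Dict String (List (List (String × String)))) :
    (cmds.foldl (fun d cmd =>
        if (d.getD key []).any (fun x => pyDictEqSS x cmd) then d
        else d.insert key (d.getD key [] ++ [cmd])) d).getD c []
      = if key == c then cmds.foldl dstep (d.getD c []) else d.getD c [] := by
  induction cmds generalizing d with
  | nil => simp
  | cons cmd rest ih =>
    simp only [List.foldl_cons, ih]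
    by_cases hk : key = c
    · subst hk
      simp only [BEq.rfl, if_true, dstep]
      split_ifs with h
      · rfl
      · rw [PySem.Dict.getD_insert_self]
    · have hk' : (key == c) = false := by simp [hk]
      simp only [hk', Bool.false_eq_true, if_false]
      split_ifs with h
      · rfl
      · rw [PySem.Dict.getD_insert_of_ne _ _ _ (Ne.symm hk)]

theorem inner_contains (key c : String) (cmds : List (List (String × String)))
    (d : PySem.Dict String (List (List (String × String)))) (h : d.contains key = true) :
    (cmds.foldl (fun d cmd =>
        if (d.getD key []).any (fun x => pyDictEqSS x cmd) then d
        else d.insert key (d.getD key [] ++ [cmd])) d).contains c = d.contains c := by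
  induction cmds generalizing d with
  | nil => simp
  | cons cmd rest ih =>
    simp only [List.foldl_cons]
    split_ifs with hcond
    · exact ih d h
    · rw [ih _ (by rw [PySem.Dict.contains_insert_self])]
      rw [PySem.Dict.contains_insert]
      by_cases hc : c = key
      · subst hc; simp [h]
      · simp [hc]

-- --- per-item step of A ---
theorem stepA_getD (pr : String × List (List (String × String))) (c : String)
    (d : PySem.Dict String (List (List (String × String)))) :
    ((fun (d : PySem.Dict String (List (List (String × String)))) (pr : String × List (List (String × String))) =>
      let d := if d.contains pr.1 then d else d.insert pr.1 []
      pr.2.foldl (fun d cmd =>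
        if (d.getD pr.1 []).any (fun x => pyDictEqSS x cmd) then d
        else d.insert pr.1 (d.getD pr.1 [] ++ [cmd])) d) d pr).getD c []
      = if pr.1 == c then pr.2.foldl dstep (d.getD c []) else d.getD c [] := by
  have hd : (if d.contains pr.1 then d else d.insert pr.1 []).getD c [] = d.getD c [] := by
    split_ifs with h1
    · rfl
    · by_cases hc : c = pr.1
      · subst hc
        rw [PySem.Dict.getD_insert_self, PySem.Dict.getD_of_not_contains _ _ (by simpa using h1)]
      · rw [PySem.Dict.getD_insert_of_ne _ _ _ hc]
  dsimp only
  rw [inner_getD, hd]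

theorem stepA_contains (pr : String × List (List (String × String))) (c : String)
    (d : PySem.Dict String (List (List (String × String)))) :
    ((fun (d : PySem.Dict String (List (List (String × String)))) (pr : String × List (List (String × String))) =>
      let d := if d.contains pr.1 then d else d.insert pr.1 []
      pr.2.foldl (fun d cmd =>
        if (d.getD pr.1 []).any (fun x => pyDictEqSS x cmd) then d
        else d.insert pr.1 (d.getD pr.1 [] ++ [cmd])) d) d pr).contains c
      = (d.contains c || pr.1 == c) := by
  dsimp only
  rw [inner_contains _ _ _ _ (by split_ifs with h1 <;> simp [h1, PySem.Dict.contains_insert_self])]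
  split_ifs with h1
  · by_cases hc : pr.1 = c
    · subst hc; simp [h1]
    · have hb : (pr.1 == c) = false := by simp [hc]
      simp [hb]
  · rw [PySem.Dict.contains_insert]
    by_cases hc : pr.1 = c
    · subst hc; simp
    · have hb : (pr.1 == c) = false := by simp [hc]
      have hb' : (c == pr.1) = false := by simp [Ne.symm hc]
      simp [hb, hb']

-- --- A's loop over one analysis's (category, cmds) items ---
theorem items_getD (items : List (String × List (List (String × String)))) (c : String)
    (d : PySem.Dict String (List (List (String × String)))) :
    (items.foldl (fun d pr =>
      let d := if d.contains pr.1 then d else d.insert pr.1 []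
      pr.2.foldl (fun d cmd =>
        if (d.getD pr.1 []).any (fun x => pyDictEqSS x cmd) then d
        else d.insert pr.1 (d.getD pr.1 [] ++ [cmd])) d) d).getD c []
      = ((items.filter (fun pr => pr.1 == c)).flatMap (fun pr => pr.2)).foldl dstep (d.getD c []) := by
  induction items generalizing d with
  | nil => simp
  | cons p rest ih =>
    simp only [List.foldl_cons, List.filter_cons]
    rw [ih]
    by_cases hp : p.1 = c
    · have hb : (p.1 == c) = true := by simp [hp]
      rw [stepA_getD]
      simp only [hb, if_true, List.flatMap_cons, List.foldl_append]
    · have hb : (p.1 == c) = false := by simp [hp]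
      rw [stepA_getD]
      simp only [hb, Bool.false_eq_true, if_false]

theorem items_contains (items : List (String × List (List (String × String)))) (c : String)
    (d : PySem.Dict String (List (List (String × String)))) :
    (items.foldl (fun d pr =>
      let d := if d.contains pr.1 then d else d.insert pr.1 []
      pr.2.foldl (fun d cmd =>
        if (d.getD pr.1 []).any (fun x => pyDictEqSS x cmd) then d
        else d.insert pr.1 (d.getD pr.1 [] ++ [cmd])) d) d).contains c
      = (d.contains c || items.any (fun pr => pr.1 == c)) := by
  induction items generalizing d with
  | nil => simp
  | cons p rest ih =>
    simp only [List.foldl_cons, List.any_cons]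
    rw [ih, stepA_contains, Bool.or_assoc]

-- --- B's per-category scan in canonical form ---
theorem cmdsForCat_eq (analyses : List (List (String × List (String × List (List (String × String)))))) (c : String) :
    cmdsForCat analyses c = (streamOf analyses c).foldl dstep [] := by
  unfold cmdsForCat
  simp only [← dstep_def]
  suffices h : ∀ (ans : List (List (String × List (String × List (List (String × String)))))) (acc : List (List (String × String))),
      ans.foldl (fun acc a => (agetD a "commands" []).foldl (fun acc pr => if pr.1 == c then pr.2.foldl dstep acc else acc) acc) acc
        = (streamOf ans c).foldl dstep acc from h analyses []
  intro ans
  induction ans with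
  | nil => intro acc; simp [streamOf]
  | cons a rest ih =>
    intro acc
    simp only [List.foldl_cons, streamOf, List.flatMap_cons, List.foldl_append, ih]
    congr 1
    have hitems : ∀ (items : List (String × List (List (String × String)))) (acc : List (List (String × String))),
        items.foldl (fun acc pr => if pr.1 == c then pr.2.foldl dstep acc else acc) acc
          = ((items.filter (fun pr => pr.1 == c)).flatMap (fun pr => pr.2)).foldl dstep acc := by
      intro items
      induction items with
      | nil => intro acc; simp
      | cons p t iht =>
        intro acc
        simp only [List.foldl_cons, List.filter_cons]
        by_cases hp : p.1 = c
        · have hb : (p.1 == c) = true := by simp [hp]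
          simp only [hb, if_true, List.flatMap_cons, List.foldl_append, iht]
        · have hb : (p.1 == c) = false := by simp [hp]
          simp only [hb, Bool.false_eq_true, if_false, iht]
    exact hitems _ acc
  

-- --- A's dict lookups in canonical form ---
theorem build_getD (analyses : List (List (String × List (String × List (List (String × String)))))) (c : String) :
    (build analyses).getD c [] = cmdsForCat analyses c := by
  rw [cmdsForCat_eq]
  unfold build
  suffices h : ∀ (ans : List (List (String × List (String × List (List (String × String)))))) (d : PySem.Dict String (List (List (String × String)))),
      (ans.foldl (fun d analysis =>
        (agetD analysis "commands" []).foldl (fun d pr =>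
          let d := if d.contains pr.1 then d else d.insert pr.1 []
          pr.2.foldl (fun d cmd =>
            if (d.getD pr.1 []).any (fun x => pyDictEqSS x cmd) then d
            else d.insert pr.1 (d.getD pr.1 [] ++ [cmd])) d) d) d).getD c []
        = (streamOf ans c).foldl dstep (d.getD c []) by
    rw [h analyses PySem.Dict.empty, PySem.Dict.getD_empty]
  intro ans
  induction ans with
  | nil => intro d; simp [streamOf]
  | cons a rest ih =>
    intro d
    simp only [List.foldl_cons, streamOf, List.flatMap_cons, List.foldl_append, ih, items_getD]
  

theorem build_contains (analyses : List (List (String × List (String × List (List (String × String)))))) (c : String) :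
    (build analyses).contains c = analyses.any (fun a => (agetD a "commands" []).any (fun pr => pr.1 == c)) := by
  unfold build
  suffices h : ∀ (ans : List (List (String × List (String × List (List (String × String)))))) (d : PySem.Dict String (List (List (String × String)))),
      (ans.foldl (fun d analysis =>
        (agetD analysis "commands" []).foldl (fun d pr =>
          let d := if d.contains pr.1 then d else d.insert pr.1 []
          pr.2.foldl (fun d cmd =>
            if (d.getD pr.1 []).any (fun x => pyDictEqSS x cmd) then d
            else d.insert pr.1 (d.getD pr.1 [] ++ [cmd])) d) d) d).contains c
        = (d.contains c || ans.any (fun a => (agetD a "commands" []).any (fun pr => pr.1 == c))) by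
    rw [h analyses PySem.Dict.empty, PySem.Dict.contains_empty]
    simp
  intro ans
  induction ans with
  | nil => intro d; simp
  | cons a rest ih =>
    intro d
    simp only [List.foldl_cons, List.any_cons, ih, items_contains, Bool.or_assoc]
  

theorem nonzero_size {κ ν : Type} [BEq κ] [LawfulBEq κ] (d : PySem.Dict κ ν) (k : κ)
    (h : d.contains k = true) : (d.size == 0) = false := by
  rw [PySem.Dict.contains_iff_mem_keys] at h
  simp only [PySem.Dict.keys] at h
  simp only [PySem.Dict.size]
  rcases List.mem_map.mp h with ⟨p, hp, _⟩
  cases hd : d.items with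
  | nil => rw [hd] at hp; cases hp
  | cons a t => simp

theorem items_size (items : List (String × List (List (String × String))))
    (d : PySem.Dict String (List (List (String × String)))) :
    ((items.foldl (fun d pr =>
      let d := if d.contains pr.1 then d else d.insert pr.1 []
      pr.2.foldl (fun d cmd =>
        if (d.getD pr.1 []).any (fun x => pyDictEqSS x cmd) then d
        else d.insert pr.1 (d.getD pr.1 [] ++ [cmd])) d) d).size == 0)
      = ((d.size == 0) && items.isEmpty) := by
  cases items with
  | nil => simp
  | cons p t =>
    have hc : (((p :: t).foldl (fun d pr =>
        let d := if d.contains pr.1 then d else d.insert pr.1 []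
        pr.2.foldl (fun d cmd =>
          if (d.getD pr.1 []).any (fun x => pyDictEqSS x cmd) then d
          else d.insert pr.1 (d.getD pr.1 [] ++ [cmd])) d) d).contains p.1) = true := by
      rw [items_contains]
      simp
    rw [nonzero_size _ _ hc]
    simp

theorem cond_eq (analyses : List (List (String × List (String × List (List (String × String)))))) (c : String) :
    (!(build analyses).contains c || (build analyses).getD c [] == []) = (cmdsForCat analyses c == []) := by
  rw [build_getD, build_contains]
  by_cases hk : analyses.any (fun a => (agetD a "commands" []).any (fun pr => pr.1 == c)) = true
  · simp only [hk, Bool.not_true, Bool.false_or]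
  · have hk' : analyses.any (fun a => (agetD a "commands" []).any (fun pr => pr.1 == c)) = false := by
      simpa using hk
    have hs : streamOf analyses c = [] := by
      rw [List.any_eq_false] at hk'
      simp only [streamOf, List.flatMap_eq_nil_iff]
      intro a ha pr hpr
      exfalso
      have h2 := List.mem_filter.mp hpr
      exact hk' a ha (List.any_eq_true.mpr ⟨pr, h2.1, h2.2⟩)
    have he : cmdsForCat analyses c = [] := by rw [cmdsForCat_eq, hs]; rfl
    simp [hk', he]

theorem size_eq (analyses : List (List (String × List (String × List (List (String × String)))))) :
    ((build analyses).size == 0) = !(analyses.any (fun a => agetD a "commands" [] != [])) := by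
  unfold build
  suffices h : ∀ (ans : List (List (String × List (String × List (List (String × String)))))) (d : PySem.Dict String (List (List (String × String)))),
      ((ans.foldl (fun d analysis =>
        (agetD analysis "commands" []).foldl (fun d pr =>
          let d := if d.contains pr.1 then d else d.insert pr.1 []
          pr.2.foldl (fun d cmd =>
            if (d.getD pr.1 []).any (fun x => pyDictEqSS x cmd) then d
            else d.insert pr.1 (d.getD pr.1 [] ++ [cmd])) d) d) d).size == 0)
        = ((d.size == 0) && !(ans.any (fun a => agetD a "commands" [] != []))) by
    rw [h analyses PySem.Dict.empty]
    simp [PySem.Dict.size_empty]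
  intro ans
  induction ans with
  | nil => intro d; simp
  | cons a rest ih =>
    intro d
    simp only [List.foldl_cons, List.any_cons, ih, items_size]
    have hne : (agetD a "commands" [] != []) = !(agetD a "commands" []).isEmpty := by
      have : ((agetD a "commands" []) == []) = (agetD a "commands" []).isEmpty := by
        cases agetD a "commands" [] <;> simp
      simp [bne, this]
    rw [hne]
    cases d.size == 0 <;> cases (agetD a "commands" []).isEmpty <;>
      cases rest.any (fun a => agetD a "commands" [] != []) <;> simp


-- the two ports, re-stated through the named pieces (definitional)
theorem portA_eq (analyses : List (List (String × List (String × List (List (String × String)))))) :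
    generate_commands_section_py analyses =
      (if (build analyses).size == 0 then
        PySem.Str.join "\n" (["## Commands and Workflows", ""] ++ ["No explicit commands detected. Check README.md for manual instructions."])
      else
        PySem.Str.join "\n" ((["install", "dev", "build", "test", "lint", "format", "deploy", "ci"] : List String).foldl (fun lines category =>
          if !((build analyses).contains category) || (build analyses).getD category [] == [] then lines
          else
            ((PySem.List.slice ((build analyses).getD category []) none (some 5)).foldl (fun lines cmd =>
              if PySem.Str.len (agetD cmd "command" "") < 80 then lines ++ ["```bash", agetD cmd "command" "", "```"] else lines)
              (lines ++ ["### " ++ pyTitle category])) ++ [""]) ["## Commands and Workflows", ""])) := rfl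

theorem portB_eq (analyses : List (List (String × List (String × List (List (String × String)))))) :
    generate_commands_section_py_alt analyses =
      (if !(analyses.any (fun a => agetD a "commands" [] != [])) then
        PySem.Str.join "\n" (["## Commands and Workflows", ""] ++ ["No explicit commands detected. Check README.md for manual instructions."])
      else
        PySem.Str.join "\n" ((["install", "dev", "build", "test", "lint", "format", "deploy", "ci"] : List String).foldl (fun out category =>
          if cmdsForCat analyses category == [] then out
          else
            ((PySem.List.slice (cmdsForCat analyses category) none (some 5)).foldl (fun out cmd =>
              if PySem.Str.len (agetD cmd "command" "") < 80 then out ++ ["```bash", agetD cmd "command" "", "```"] else out)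
              (out ++ ["### " ++ pyTitle category])) ++ [""]) ["## Commands and Workflows", ""])) := rfl

-- ===== VERDICT (by name: the statement is the Claim_ definition above) =====
theorem generate_commands_section_py_spec : Claim_equal_generate_commands_section_py := by
  intro analyses _
  unfold Spec_generate_commands_section_py
  rw [portA_eq, portB_eq, size_eq]
  have hf : (fun (lines : List String) (category : String) =>
      if !((build analyses).contains category) || (build analyses).getD category [] == [] then lines
      else
        ((PySem.List.slice ((build analyses).getD category []) none (some 5)).foldl (fun lines cmd =>
          if PySem.Str.len (agetD cmd "command" "") < 80 then lines ++ ["```bash", agetD cmd "command" "", "```"] else lines)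
          (lines ++ ["### " ++ pyTitle category])) ++ [""])
    = (fun (out : List String) (category : String) =>
      if cmdsForCat analyses category == [] then out
      else
        ((PySem.List.slice (cmdsForCat analyses category) none (some 5)).foldl (fun out cmd =>
          if PySem.Str.len (agetD cmd "command" "") < 80 then out ++ ["```bash", agetD cmd "command" "", "```"] else out)
          (out ++ ["### " ++ pyTitle category])) ++ [""]) := by
    funext lines category
    rw [cond_eq, build_getD]
  rw [hf]
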